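-- pv_equiv track=rewrite | github.com/KungKemi/Diversity-App | src/NCCD_app.py | capitalise
-- ===== SOURCE A (Python) =====
-- def capitalise(name):
--     """ Capitalises name"""
--     FIRST_INITIAL = 0
--     formatted_name = ''
--     for i, char in enumerate(name):
--         if char.isalpha():
--             # Is an alphanumeric value
--             if i == FIRST_INITIAL:
--                 # First letter in name
--                 formatted_name += char.upper()
--             else:
--                 formatted_name += char.lower()
--     return formatted_name
-- ===== SOURCE B (Python) =====
-- def capitalise(name):
--     """ Capitalises name"""
--     out = []
--     i = len(name) - 1
--     while i > 0:
--         c = name[i]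
--         if c.isalpha():
--             out.append(c.lower())
--         i -= 1
--     if name and name[0].isalpha():
--         out.append(name[0].upper())
--     out.reverse()
--     return ''.join(out)
-- ===== Notes on version B (the rewrite author's own statement) =====
-- stated objective: alternative
-- what changed: Builds the output back-to-front: a while loop walks the string from the last index down to 1 appending lowercased alphabetic chars, the index-0 char is appended last, and the accumulated list is reversed once at the end, replacing A's forward enumerate loop with an in-loop i==0 test.
import Mathlib
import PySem

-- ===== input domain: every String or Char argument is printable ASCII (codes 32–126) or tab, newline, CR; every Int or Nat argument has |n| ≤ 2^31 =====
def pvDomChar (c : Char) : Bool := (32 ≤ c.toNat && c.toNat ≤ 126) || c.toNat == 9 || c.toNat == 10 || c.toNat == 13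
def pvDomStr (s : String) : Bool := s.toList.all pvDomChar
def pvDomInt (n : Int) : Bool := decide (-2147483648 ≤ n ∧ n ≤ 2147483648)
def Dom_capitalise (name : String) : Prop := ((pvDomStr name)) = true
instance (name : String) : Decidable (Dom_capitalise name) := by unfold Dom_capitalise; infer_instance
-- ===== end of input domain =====

-- B builds the output back-to-front (while loop from the last index down to 1, then the
-- index-0 char, then one reverse) instead of A's forward enumerate loop; objective: alternative.

-- ===== PORT A =====
-- A's loop body: append upper at index 0, lower elsewhere, skip non-alpha
def capBody (acc : List Char) (p : Int × Char) : List Char :=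
  if PySem.Chars.isalpha p.2 then
    if p.1 == 0 then acc ++ [PySem.Chars.upperChar p.2]
    else acc ++ [PySem.Chars.lowerChar p.2]
  else acc

def capitalise (name : String) : String :=
  String.mk ((PySem.List.enumerate name.toList).foldl capBody [])

-- ===== PORT B =====
-- the while loop: i counts down, appends lower(name[i]) when alphabetic, stops at i = 0
def capLoop (cs : List Char) : Nat → List Char → List Char
  | 0, out => out
  | j + 1, out =>
      let c := cs.getD (j + 1) ' '
      capLoop cs j (if PySem.Chars.isalpha c then out ++ [PySem.Chars.lowerChar c] else out)

def capitalise_alt (name : String) : String :=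
  let cs := name.toList
  let out := capLoop cs (cs.length - 1) []
  let out2 :=
    match cs with
    | [] => out
    | c :: _ => if PySem.Chars.isalpha c then out ++ [PySem.Chars.upperChar c] else out
  String.mk out2.reverse

-- ===== PRECONDITION & SPEC =====
def Spec_capitalise (name : String) (out : String) : Prop := out = capitalise_alt name
instance (name : String) (out : String) : Decidable (Spec_capitalise name out) := by unfold Spec_capitalise; infer_instance

-- ===== CLAIM (what is proved, stated in full; the proofs are below) =====
def Claim_equal_capitalise : Prop := ∀ (name : String), Dom_capitalise name → Spec_capitalise name (capitalise name)

-- ===== LEMMAS AND PROOFS =====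

-- over the tail (all indices ≥ 1) A's fold is filter-then-lowercase
theorem capBody_tail (l : List Char) : ∀ (s : Int) (acc : List Char), 1 ≤ s →
    (PySem.List.enumerate l s).foldl capBody acc
      = acc ++ (l.filter PySem.Chars.isalpha).map PySem.Chars.lowerChar := by
  induction l with
  | nil => intro s acc _; simp [PySem.List.enumerate_nil]
  | cons c t ih =>
      intro s acc hs
      rw [PySem.List.enumerate_cons]
      simp only [List.foldl_cons, List.filter_cons]
      have hne : (s == (0:Int)) = false := by
        simp only [beq_eq_false_iff_ne]; omega
      by_cases h : PySem.Chars.isalpha c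
      · simp only [capBody, h, hne, if_true, Bool.false_eq_true, if_false]
        rw [ih (s+1) _ (by omega)]
        simp
      · simp only [capBody, h, Bool.false_eq_true, if_false]
        exact ih (s+1) acc (by omega)

-- B's countdown loop collects the lowercased alphabetic chars of indices j..1 (reversed)
theorem capLoop_eq (cs : List Char) : ∀ (j : Nat) (out : List Char), j < cs.length →
    capLoop cs j out
      = out ++ ((((cs.drop 1).take j).filter PySem.Chars.isalpha).map PySem.Chars.lowerChar).reverse := by
  intro j
  induction j with
  | zero => intro out _; simp [capLoop]
  | succ j ih =>
      intro out hj
      have hj' : j + 1 < cs.length := hj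
      have hidx : cs.getD (j + 1) ' ' = cs[j + 1]'hj' := by
        simp [List.getD, List.getElem?_eq_getElem hj']
      have htake : (cs.drop 1).take (j + 1)
          = (cs.drop 1).take j ++ [cs[j + 1]'hj'] := by
        have hjlen : j < (cs.drop 1).length := by
          simp; omega
        rw [List.take_succ, List.getElem?_eq_getElem hjlen]
        simp
      simp only [capLoop, hidx]
      rw [ih _ (by omega), htake]
      by_cases h : PySem.Chars.isalpha (cs[j + 1]'hj') <;>
        simp [h, List.filter_append]
theorem capitalise_eq_alt (name : String) : capitalise name = capitalise_alt name := by
  unfold capitalise capitalise_alt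
  cases hcs : name.toList with
  | nil => simp [PySem.List.enumerate_nil, capLoop]
  | cons c t =>
      dsimp only
      have hlen : (c :: t).length - 1 < (c :: t).length := by simp
      rw [PySem.List.enumerate_cons, List.foldl_cons,
        show (0:Int)+1 = 1 from rfl, capBody_tail t 1 _ (by omega)]
      have htake : ((c :: t).drop 1).take ((c :: t).length - 1) = t := by simp
      rw [capLoop_eq (c :: t) _ [] hlen, htake]
      by_cases h : PySem.Chars.isalpha c <;> simp [capBody, h]

-- ===== VERDICT (by name: the statement is the Claim_ definition above) =====
theorem capitalise_spec : Claim_equal_capitalise := by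
  intro name _
  unfold Spec_capitalise
  exact capitalise_eq_alt name
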